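-- pv_equiv track=rewrite | github.com/Nghia03092004/nghia03092004.github.io | project_euler_unified/problem_838/solution.py | count_non_coprime_totient
-- ===== SOURCE A (Python) =====
-- def count_non_coprime_totient(N: int):
--     """Use Euler's totient: sum_{a=1}^{N} phi(a) = coprime pairs count (ordered, a<b) + N.
--     Actually, sum_{a=1}^{N} phi(a) = (Phi(N) + 1) / 2 where Phi counts ordered coprime pairs.
--     More precisely: number of (a,b) with 1<=b<=a<=N and gcd(a,b)=1 is sum phi(a).
--     """
--     # Compute phi via sieve
--     phi = list(range(N + 1))
--     for p in range(2, N + 1):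
--         if phi[p] == p:  # p is prime
--             for m in range(p, N + 1, p):
--                 phi[m] -= phi[m] // p
--     coprime_le = sum(phi[1:N + 1])  # sum phi(a) for a=1..N = coprime (b,a) with b<=a
--     total_pairs = N * (N + 1) // 2
--     return total_pairs - coprime_le
-- ===== SOURCE B (Python) =====
-- def count_non_coprime_totient(N: int):
--     """Divisor-sum sieve (Mobius inversion of sum_{d|m} phi(d) = m):
--     when the outer loop reaches d, every proper divisor of d has already been
--     subtracted, so phi[d] is the finished totient of d; it is added to the
--     running coprime count and subtracted from every proper multiple of d."""
--     phi = list(range(N + 1))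
--     coprime_le = 0
--     for d in range(1, N + 1):
--         f = phi[d]  # = totient(d): all proper divisors of d already processed
--         coprime_le += f
--         for m in range(2 * d, N + 1, d):
--             phi[m] -= f
--     return N * (N + 1) // 2 - coprime_le
-- ===== Notes on version B (the rewrite author's own statement) =====
-- stated objective: alternative
-- what changed: Replaces the prime-wise totient sieve (primality test via phi[p]==p, then phi[m] -= phi[m]//p over multiples of each prime) with a divisor-sum sieve that Mobius-inverts sum_{d|m} phi(d) = m: phi[m] -= phi[d] over proper multiples of every d, with the coprime count accumulated on the fly instead of a final slice sum.
import Mathlib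
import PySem

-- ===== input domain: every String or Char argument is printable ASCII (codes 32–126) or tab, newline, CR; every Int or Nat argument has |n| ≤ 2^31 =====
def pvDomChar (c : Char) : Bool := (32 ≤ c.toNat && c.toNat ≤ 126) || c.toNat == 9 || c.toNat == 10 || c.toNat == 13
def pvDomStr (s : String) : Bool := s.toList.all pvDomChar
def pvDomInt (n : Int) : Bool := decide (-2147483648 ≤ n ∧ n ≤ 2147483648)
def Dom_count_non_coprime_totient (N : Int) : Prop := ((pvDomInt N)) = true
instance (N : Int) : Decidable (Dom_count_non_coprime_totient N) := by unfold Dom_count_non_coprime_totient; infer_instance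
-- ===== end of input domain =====

-- B replaces A's prime-wise totient sieve by a divisor-sum sieve (Möbius inversion of
-- ∑_{d∣m} φ(d) = m) with the coprime count accumulated on the fly: an alternative
-- algorithm of similar cost, proved to return the same value for every Int input.

-- ===== PORT A =====
-- A: sieve phi[m] -= phi[m] // p over multiples of each prime p (detected by phi[p] == p),
-- then total_pairs - sum(phi[1:N+1]).
def count_non_coprime_totient (N : Int) : Int :=
  let phi0 : Array Int := (PySem.List.pyRange 0 (N + 1) 1).toArray
  let phi := (PySem.List.pyRange 2 (N + 1) 1).foldl (fun phi p =>
    if phi.getD p.toNat 0 = p then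
      (PySem.List.pyRange p (N + 1) p).foldl (fun l m =>
        l.setIfInBounds m.toNat
          (l.getD m.toNat 0 - PySem.Int.floordiv (l.getD m.toNat 0) p)) phi
    else phi) phi0
  let coprime_le := (PySem.List.slice phi.toList (some 1) (some (N + 1))).sum
  let total_pairs := PySem.Int.floordiv (N * (N + 1)) 2
  total_pairs - coprime_le

-- ===== PORT B =====
-- B: divisor-sum sieve: phi[d] is finished when the loop reaches d; it is added to the
-- running coprime count and subtracted from every proper multiple of d.
def count_non_coprime_totient_alt (N : Int) : Int :=
  let st := (PySem.List.pyRange 1 (N + 1) 1).foldl (fun st d =>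
    let f := st.1.getD d.toNat 0
    ((PySem.List.pyRange (2 * d) (N + 1) d).foldl (fun l m =>
        l.setIfInBounds m.toNat (l.getD m.toNat 0 - f)) st.1,
     st.2 + f)) ((PySem.List.pyRange 0 (N + 1) 1).toArray, (0 : Int))
  PySem.Int.floordiv (N * (N + 1)) 2 - st.2

-- ===== PRECONDITION & SPEC =====
def Spec_count_non_coprime_totient (N : Int) (out : Int) : Prop := out = count_non_coprime_totient_alt N
instance (N : Int) (out : Int) : Decidable (Spec_count_non_coprime_totient N out) := by unfold Spec_count_non_coprime_totient; infer_instance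

-- ===== CLAIM (what is proved, stated in full; the proofs are below) =====
def Claim_equal_count_non_coprime_totient : Prop := ∀ (N : Int), Dom_count_non_coprime_totient N → Spec_count_non_coprime_totient N (count_non_coprime_totient N)

-- ===== LEMMAS AND PROOFS =====

theorem pv_slice_nil (a b : Int) : PySem.List.slice ([] : List Int) (some a) (some b) = [] := by
  have h := PySem.List.length_slice ([] : List Int) a b
  have h0 := PySem.List.clampIdx_le ([] : List Int).length b
  have h1 := PySem.List.clampIdx_le ([] : List Int).length a
  simp only [List.length_nil] at h h0 h1
  exact List.eq_nil_of_length_eq_zero (by omega)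

theorem pv_nodup_pyRange (a b s : Int) (hs : 0 < s) : (PySem.List.pyRange a b s).Nodup := by
  rw [PySem.List.pyRange_of_pos a b hs]
  exact (List.nodup_range).map (fun x y hxy => by nlinarith [hxy])

theorem pv_set_mapRange (f : Nat → Int) (L i : Nat) (hi : i < L) (v : Int) :
    ((List.range L).map f).set i v = (List.range L).map (Function.update f i v) := by
  apply List.ext_getElem
  · simp
  · intro j hj1 hj2
    rw [List.getElem_map, List.getElem_set, List.getElem_range]
    rcases eq_or_ne j i with h | h
    · subst h; simp
    · simp [Function.update_of_ne h, Ne.symm h]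

theorem pv_foldl_setD (L : Nat) (ms : List Int) (upd : Int → Int) (f : Nat → Int)
    (hnd : ms.Nodup) (hm : ∀ m ∈ ms, 0 ≤ m ∧ m < (L : Int)) :
    ms.foldl (fun l m => PySem.List.pySetD l m (upd (PySem.List.pyGetD l m 0)))
      ((List.range L).map f)
    = (List.range L).map (fun (j : Nat) => if (j : Int) ∈ ms then upd (f j) else f j) := by
  induction ms generalizing f with
  | nil => simp
  | cons m t ih =>
    obtain ⟨hm0, hmL⟩ := hm m (List.mem_cons_self ..)
    have hmt : m.toNat < L := by omega
    have hget : PySem.List.pyGetD ((List.range L).map f) m 0 = f m.toNat := by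
      rw [PySem.List.pyGetD_of_nonneg _ _ hm0, PySem.List.getD_map_range _ _ _ _ hmt]
    have hset : PySem.List.pySetD ((List.range L).map f) m (upd (f m.toNat))
        = (List.range L).map (Function.update f m.toNat (upd (f m.toNat))) := by
      rw [PySem.List.pySetD_of_nonneg _ _ hm0, pv_set_mapRange _ _ _ hmt]
    rw [List.foldl_cons, hget, hset,
      ih (Function.update f m.toNat (upd (f m.toNat))) hnd.of_cons
        (fun x hx => hm x (List.mem_cons_of_mem _ hx))]
    apply List.map_congr_left
    intro j hj
    have hjm_iff : ((j : Int) = m) ↔ j = m.toNat := by omega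
    have hmnotint : m ∉ t := (List.nodup_cons.mp hnd).1
    by_cases hjt : (j : Int) ∈ t
    · have hne : (j : Int) ≠ m := fun he => hmnotint (he ▸ hjt)
      have hne' : j ≠ m.toNat := fun he => hne (hjm_iff.mpr he)
      simp [hjt, Function.update_of_ne hne']
    · by_cases hjm : (j : Int) = m
      · have he : j = m.toNat := hjm_iff.mp hjm
        subst he
        simp only [List.mem_cons, hjm, true_or, if_pos]
        rw [if_neg (by simpa [hjm] using hjt), Function.update_self]
      · have hne' : j ≠ m.toNat := fun he => hjm (hjm_iff.mpr he)
        simp [hjt, hjm, Function.update_of_ne hne']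

theorem pv_arr_getD (a : Array Int) (i : Nat) (d : Int) : a.getD i d = a.toList.getD i d := by
  unfold Array.getD
  split
  · rename_i h
    rw [List.getD_eq_getElem?_getD, List.getElem?_eq_getElem (by simpa using h)]
    simp [Array.getElem_toList]
  · rename_i h
    rw [List.getD_eq_getElem?_getD, List.getElem?_eq_none (by simpa using Nat.le_of_not_lt h)]
    rfl

theorem pv_arr_get_py (a : Array Int) (i : Int) (hi : 0 ≤ i) :
    a.getD i.toNat 0 = PySem.List.pyGetD a.toList i 0 := by
  rw [PySem.List.pyGetD_of_nonneg _ _ hi, pv_arr_getD]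

theorem pv_arr_set_py (a : Array Int) (i : Int) (v : Int) (hi : 0 ≤ i) :
    (a.setIfInBounds i.toNat v).toList = PySem.List.pySetD a.toList i v := by
  rw [PySem.List.pySetD_of_nonneg _ _ hi, Array.toList_setIfInBounds]

theorem pv_foldl_toList (l : List Int) (g : Array Int → Int → Array Int)
    (g' : List Int → Int → List Int) (a : Array Int)
    (h : ∀ (arr : Array Int) (i : Int), i ∈ l → (g arr i).toList = g' arr.toList i) :
    (l.foldl g a).toList = l.foldl g' a.toList := by
  induction l generalizing a with
  | nil => rfl
  | cons x t ih =>
    rw [List.foldl_cons, List.foldl_cons,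
      ih _ (fun arr i hi => h arr i (List.mem_cons_of_mem _ hi)),
      h a x (List.mem_cons_self ..)]

theorem pv_foldl_toList_pair (l : List Int) (g : Array Int × Int → Int → Array Int × Int)
    (g' : List Int × Int → Int → List Int × Int) (a : Array Int × Int)
    (h : ∀ s i, i ∈ l → ((g s i).1.toList, (g s i).2) = g' (s.1.toList, s.2) i) :
    ((l.foldl g a).1.toList, (l.foldl g a).2) = l.foldl g' (a.1.toList, a.2) := by
  induction l generalizing a with
  | nil => rfl
  | cons x t ih =>
    rw [List.foldl_cons, List.foldl_cons,
      ih _ (fun s i hi => h s i (List.mem_cons_of_mem _ hi)),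
      h a x (List.mem_cons_self ..)]

theorem pvA_bridge (N : Int) :
    ((PySem.List.pyRange 2 (N + 1) 1).foldl (fun phi p =>
      if phi.getD p.toNat 0 = p then
        (PySem.List.pyRange p (N + 1) p).foldl (fun l m =>
          l.setIfInBounds m.toNat
            (l.getD m.toNat 0 - PySem.Int.floordiv (l.getD m.toNat 0) p)) phi
      else phi) ((PySem.List.pyRange 0 (N + 1) 1).toArray)).toList
    = (PySem.List.pyRange 2 (N + 1) 1).foldl (fun phi p =>
      if PySem.List.pyGetD phi p 0 = p then
        (PySem.List.pyRange p (N + 1) p).foldl (fun l m =>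
          PySem.List.pySetD l m
            (PySem.List.pyGetD l m 0 - PySem.Int.floordiv (PySem.List.pyGetD l m 0) p)) phi
      else phi) (PySem.List.pyRange 0 (N + 1) 1) := by
  refine Eq.trans (pv_foldl_toList _ _ (fun phi p =>
      if PySem.List.pyGetD phi p 0 = p then
        (PySem.List.pyRange p (N + 1) p).foldl (fun l m =>
          PySem.List.pySetD l m
            (PySem.List.pyGetD l m 0 - PySem.Int.floordiv (PySem.List.pyGetD l m 0) p)) phi
      else phi) _ (fun arr p hp => ?_)) (by simp)
  have hp2 : 2 ≤ p := ((PySem.List.mem_pyRange_one).mp hp).1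
  rw [pv_arr_get_py arr p (by omega)]
  beta_reduce
  by_cases htest : PySem.List.pyGetD arr.toList p 0 = p
  · rw [if_pos htest, if_pos htest]
    exact pv_foldl_toList _ _ _ _ (fun arr2 m hm => by
      have hmp : p ≤ m := ((PySem.List.mem_pyRange_iff_of_pos (by omega) m).mp hm).1
      rw [pv_arr_set_py arr2 m _ (by omega), pv_arr_get_py arr2 m (by omega)])
  · rw [if_neg htest, if_neg htest]

theorem pvB_bridge (N : Int) :
    (((PySem.List.pyRange 1 (N + 1) 1).foldl (fun st d =>
        ((PySem.List.pyRange (2 * d) (N + 1) d).foldl (fun l m =>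
            l.setIfInBounds m.toNat (l.getD m.toNat 0 - st.1.getD d.toNat 0)) st.1,
         st.2 + st.1.getD d.toNat 0)) ((PySem.List.pyRange 0 (N + 1) 1).toArray, (0 : Int))).1.toList,
     ((PySem.List.pyRange 1 (N + 1) 1).foldl (fun st d =>
        ((PySem.List.pyRange (2 * d) (N + 1) d).foldl (fun l m =>
            l.setIfInBounds m.toNat (l.getD m.toNat 0 - st.1.getD d.toNat 0)) st.1,
         st.2 + st.1.getD d.toNat 0)) ((PySem.List.pyRange 0 (N + 1) 1).toArray, (0 : Int))).2)
    = (PySem.List.pyRange 1 (N + 1) 1).foldl (fun st d =>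
        ((PySem.List.pyRange (2 * d) (N + 1) d).foldl (fun l m =>
            PySem.List.pySetD l m (PySem.List.pyGetD l m 0 - PySem.List.pyGetD st.1 d 0)) st.1,
         st.2 + PySem.List.pyGetD st.1 d 0)) (PySem.List.pyRange 0 (N + 1) 1, (0 : Int)) := by
  refine Eq.trans (pv_foldl_toList_pair _ _ (fun st d =>
      ((PySem.List.pyRange (2 * d) (N + 1) d).foldl (fun l m =>
          PySem.List.pySetD l m (PySem.List.pyGetD l m 0 - PySem.List.pyGetD st.1 d 0)) st.1,
       st.2 + PySem.List.pyGetD st.1 d 0)) _ (fun s d hd => ?_)) (by simp)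
  have hd1 : 1 ≤ d := ((PySem.List.mem_pyRange_one).mp hd).1
  rw [pv_arr_get_py s.1 d (by omega)]
  beta_reduce
  refine Prod.ext ?_ rfl
  simp only []
  exact pv_foldl_toList _ _ _ _ (fun arr2 m hm => by
    have hmp : 2 * d ≤ m := ((PySem.List.mem_pyRange_iff_of_pos (by omega) m).mp hm).1
    rw [pv_arr_set_py arr2 m _ (by omega), pv_arr_get_py arr2 m (by omega)])

def pvS (k j : Nat) : Finset Nat := j.primeFactors.filter (· ≤ k)

def pvValA (k j : Nat) : Nat := (j / ∏ p ∈ pvS k j, p) * ∏ p ∈ pvS k j, (p - 1)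

def pvValB (k j : Nat) : Int :=
  (j : Int) - ∑ d ∈ j.properDivisors.filter (· ≤ k), (Nat.totient d : Int)

theorem pv_floordiv_natCast (a b : Nat) :
    PySem.Int.floordiv (a : Int) (b : Int) = ((a / b : Nat) : Int) := by
  simp [PySem.Int.floordiv, Int.fdiv_eq_ediv]

theorem pv_dvd_shift (a b c : Int) (h : a ∣ c) : (a ∣ b - c) ↔ (a ∣ b) := by
  constructor
  · intro hh
    have := dvd_add hh h
    simpa using this
  · intro hh
    exact dvd_sub hh h

theorem pv_memA (k n j : Nat) :
    ((j : Int) ∈ PySem.List.pyRange ((k : Int) + 1) ((n : Int) + 1) ((k : Int) + 1))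
      ↔ ((k + 1) ∣ j ∧ k + 1 ≤ j ∧ j ≤ n) := by
  rw [PySem.List.mem_pyRange_iff_of_pos (by omega), pv_dvd_shift _ _ _ (dvd_refl _)]
  constructor
  · rintro ⟨h1, h2, h3⟩
    refine ⟨?_, by omega, by omega⟩
    exact_mod_cast h3
  · rintro ⟨h1, h2, h3⟩
    refine ⟨by omega, by omega, ?_⟩
    exact_mod_cast h1

theorem pv_memB (k n j : Nat) :
    ((j : Int) ∈ PySem.List.pyRange (2 * ((k : Int) + 1)) ((n : Int) + 1) ((k : Int) + 1))
      ↔ ((k + 1) ∣ j ∧ 2 * (k + 1) ≤ j ∧ j ≤ n) := by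
  rw [PySem.List.mem_pyRange_iff_of_pos (by omega),
    pv_dvd_shift _ _ _ (Dvd.dvd.mul_left (dvd_refl ((k : Int) + 1)) 2)]
  constructor
  · rintro ⟨h1, h2, h3⟩
    refine ⟨?_, by omega, by omega⟩
    exact_mod_cast h3
  · rintro ⟨h1, h2, h3⟩
    refine ⟨by omega, by omega, ?_⟩
    exact_mod_cast h1

theorem pvS_one (j : Nat) : pvS 1 j = ∅ := by
  unfold pvS
  rw [Finset.filter_eq_empty_iff]
  intro q hq
  have := (Nat.mem_primeFactors.mp hq).1.two_le
  simp; omega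

theorem pvValA_one (j : Nat) : pvValA 1 j = j := by
  simp [pvValA, pvS_one]

theorem pvS_succ_of_not (k j : Nat) (h : ¬((k+1).Prime ∧ (k+1) ∣ j ∧ j ≠ 0)) :
    pvS (k+1) j = pvS k j := by
  unfold pvS
  ext q
  simp only [Finset.mem_filter, Nat.mem_primeFactors]
  constructor
  · rintro ⟨⟨hq, hdvd, hj⟩, hle⟩
    refine ⟨⟨hq, hdvd, hj⟩, ?_⟩
    rcases eq_or_ne q (k+1) with rfl | hne
    · exact absurd ⟨hq, hdvd, hj⟩ h
    · omega
  · rintro ⟨hq, hle⟩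
    exact ⟨hq, by omega⟩

theorem pvValA_succ_of_not (k j : Nat) (h : ¬((k+1).Prime ∧ (k+1) ∣ j ∧ j ≠ 0)) :
    pvValA (k+1) j = pvValA k j := by
  unfold pvValA; rw [pvS_succ_of_not k j h]

theorem pvS_prod_dvd (k j : Nat) : (∏ p ∈ pvS k j, p) ∣ j := by
  rcases eq_or_ne j 0 with rfl | hj
  · simp
  exact dvd_trans (Finset.prod_dvd_prod_of_subset _ _ _ (Finset.filter_subset _ _))
    (Nat.prod_primeFactors_dvd j)

theorem pvS_prod_pos (k j : Nat) : 0 < ∏ p ∈ pvS k j, p := by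
  apply Finset.prod_pos
  intro q hq
  have := (Nat.mem_primeFactors.mp (Finset.mem_filter.mp hq).1).1.two_le
  omega

theorem pv_not_dvd_prod (k j p : Nat) (hp : p.Prime) (hpk : k < p) : ¬ p ∣ ∏ q ∈ pvS k j, q := by
  intro hdvd
  obtain ⟨q, hq, hpq⟩ := (Prime.dvd_finset_prod_iff hp.prime _).mp hdvd
  obtain ⟨hqf, hqk⟩ := Finset.mem_filter.mp hq
  have hqp := (Nat.mem_primeFactors.mp hqf).1
  have : p = q := ((Nat.prime_dvd_prime_iff_eq hp hqp).mp hpq)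
  omega

theorem pvValA_succ_prime (k j : Nat) (hp : (k+1).Prime) (hd : (k+1) ∣ j) (hj : j ≠ 0) :
    pvValA (k+1) j = pvValA k j - pvValA k j / (k+1) ∧ (k+1) ∣ pvValA k j := by
  have hmem : (k+1) ∈ j.primeFactors := Nat.mem_primeFactors.mpr ⟨hp, hd, hj⟩
  have hnotin : (k+1) ∉ pvS k j := by
    intro hmem
    have := (Finset.mem_filter.mp hmem).2
    omega
  have hins : pvS (k+1) j = insert (k+1) (pvS k j) := by
    unfold pvS
    ext q
    simp only [Finset.mem_filter, Finset.mem_insert, Nat.mem_primeFactors]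
    constructor
    · rintro ⟨hq, hle⟩
      rcases eq_or_ne q (k+1) with rfl | hne
      · exact Or.inl rfl
      · exact Or.inr ⟨hq, by omega⟩
    · rintro (rfl | ⟨hq, hle⟩)
      · exact ⟨Nat.mem_primeFactors.mp hmem, by omega⟩
      · exact ⟨hq, by omega⟩
  set P := ∏ q ∈ pvS k j, q with hP
  set Q := ∏ q ∈ pvS k j, (q - 1) with hQ
  have hPpos : 0 < P := pvS_prod_pos k j
  have hPdvd : P ∣ j := pvS_prod_dvd k j
  have hcop : Nat.Coprime (k+1) P :=
    (Nat.Prime.coprime_iff_not_dvd hp).mpr (pv_not_dvd_prod k j (k+1) hp (by omega))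
  have hmul : (k+1) * P ∣ j := hcop.mul_dvd_of_dvd_of_dvd hd hPdvd
  obtain ⟨t, ht⟩ := hmul
  have hjP : j / P = (k+1) * t := by
    rw [ht, show (k+1) * P * t = P * ((k+1) * t) by ring, Nat.mul_div_cancel_left _ hPpos]
  have hjPp : j / ((k+1) * P) = t := by
    rw [ht, Nat.mul_div_cancel_left _ (by positivity)]
  have hvk : pvValA k j = (k+1) * (t * Q) := by
    unfold pvValA
    rw [← hP, ← hQ, hjP]; ring
  have hvk1 : pvValA (k+1) j = t * ((k+1-1) * Q) := by
    unfold pvValA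
    rw [hins, Finset.prod_insert hnotin, Finset.prod_insert hnotin, ← hP, ← hQ, hjPp]
  constructor
  · rw [hvk1, hvk, Nat.mul_div_cancel_left _ (by omega : 0 < k+1)]
    have : (k+1) * (t * Q) - t * Q = k * (t * Q) := by
      rw [show (k+1) * (t*Q) = k * (t*Q) + t*Q by ring]
      omega
    rw [this]
    simp; ring
  · exact ⟨t * Q, hvk⟩

theorem pvA_detect (k : Nat) (hk : 1 ≤ k) : pvValA k (k+1) = k+1 ↔ (k+1).Prime := by
  constructor
  · intro hval
    by_contra hnp
    -- composite: value strictly less than k+1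
    have h2 : 2 ≤ k+1 := by omega
    have hne1 : (k+1) ≠ 1 := by omega
    set q := (k+1).minFac with hq
    have hqp : q.Prime := Nat.minFac_prime hne1
    have hqd : q ∣ (k+1) := Nat.minFac_dvd _
    have hqlt : q < k+1 := by
      rcases lt_or_eq_of_le (Nat.le_of_dvd (by omega) hqd) with h | h
      · exact h
      · exact absurd (h ▸ hqp) hnp
    have hqmem : q ∈ pvS k (k+1) := by
      unfold pvS
      simp only [Finset.mem_filter, Nat.mem_primeFactors]
      exact ⟨⟨hqp, hqd, by omega⟩, by omega⟩
    set P := ∏ p ∈ pvS k (k+1), p with hP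
    set Q := ∏ p ∈ pvS k (k+1), (p - 1) with hQ
    have hPpos : 0 < P := pvS_prod_pos k (k+1)
    have hPdvd : P ∣ (k+1) := pvS_prod_dvd k (k+1)
    have hQP : Q < P := by
      apply Finset.prod_lt_prod_of_nonempty
      · intro i hi
        have := (Nat.mem_primeFactors.mp (Finset.mem_filter.mp hi).1).1.two_le
        omega
      · intro i hi
        have := (Nat.mem_primeFactors.mp (Finset.mem_filter.mp hi).1).1.two_le
        omega
      · exact ⟨q, hqmem⟩
    have hdivpos : 0 < (k+1) / P := Nat.div_pos (Nat.le_of_dvd (by omega) hPdvd) hPpos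
    have : pvValA k (k+1) < k+1 := by
      calc pvValA k (k+1) = ((k+1) / P) * Q := rfl
        _ < ((k+1) / P) * P := by exact (Nat.mul_lt_mul_left hdivpos).mpr hQP
        _ = k+1 := Nat.div_mul_cancel hPdvd
    omega
  · intro hp
    have hS : pvS k (k+1) = ∅ := by
      unfold pvS
      rw [Finset.filter_eq_empty_iff]
      intro q hq
      rw [hp.primeFactors] at hq
      simp at hq
      simp [hq]
    unfold pvValA
    rw [hS]
    simp

theorem pvValA_totient (k j : Nat) (hjk : j ≤ k) : pvValA k j = Nat.totient j := by
  rcases eq_or_ne j 0 with rfl | hj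
  · simp [pvValA]
  have hS : pvS k j = j.primeFactors := by
    unfold pvS
    rw [Finset.filter_eq_self]
    intro q hq
    have hdvd := (Nat.mem_primeFactors.mp hq).2.1
    have := Nat.le_of_dvd (by omega) hdvd
    simp; omega
  unfold pvValA
  rw [hS, Nat.totient_eq_div_primeFactors_mul]

theorem pvValB_zero (j : Nat) : pvValB 0 j = j := by
  unfold pvValB
  have : j.properDivisors.filter (· ≤ 0) = ∅ := by
    rw [Finset.filter_eq_empty_iff]
    intro q hq
    obtain ⟨hdvd, hlt⟩ := Nat.mem_properDivisors.mp hq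
    have : q ≠ 0 := by
      rintro rfl
      rw [Nat.zero_dvd.mp hdvd] at hlt
      omega
    simp; omega
  rw [this]
  simp

theorem pvValB_self (k : Nat) : pvValB k (k+1) = (Nat.totient (k+1) : Int) := by
  unfold pvValB
  have hfull : (k+1).properDivisors.filter (· ≤ k) = (k+1).properDivisors := by
    rw [Finset.filter_eq_self]
    intro q hq
    have := (Nat.mem_properDivisors.mp hq).2
    simp; omega
  rw [hfull]
  have hins := Nat.insert_self_properDivisors (n := k+1) (by omega)
  have hsum := Nat.sum_totient (k+1)
  rw [← hins, Finset.sum_insert (by simp [Nat.mem_properDivisors])] at hsum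
  have hc := congrArg (Nat.cast : Nat → Int) hsum
  push_cast at hc ⊢
  linarith

theorem pvValB_succ_mem (k j : Nat) (h : (k+1) ∈ j.properDivisors) :
    pvValB (k+1) j = pvValB k j - (Nat.totient (k+1) : Int) := by
  unfold pvValB
  have hnotin : (k+1) ∉ j.properDivisors.filter (· ≤ k) := by
    simp [Finset.mem_filter]
  have hins : j.properDivisors.filter (· ≤ k+1) = insert (k+1) (j.properDivisors.filter (· ≤ k)) := by
    ext q
    simp only [Finset.mem_filter, Finset.mem_insert]
    constructor
    · rintro ⟨hq, hle⟩
      rcases eq_or_ne q (k+1) with rfl | hne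
      · exact Or.inl rfl
      · exact Or.inr ⟨hq, by omega⟩
    · rintro (rfl | ⟨hq, hle⟩)
      · exact ⟨h, by omega⟩
      · exact ⟨hq, by omega⟩
  rw [hins, Finset.sum_insert hnotin]
  ring

theorem pvValB_succ_not (k j : Nat) (h : (k+1) ∉ j.properDivisors) :
    pvValB (k+1) j = pvValB k j := by
  unfold pvValB
  have : j.properDivisors.filter (· ≤ k+1) = j.properDivisors.filter (· ≤ k) := by
    ext q
    simp only [Finset.mem_filter]
    constructor
    · rintro ⟨hq, hle⟩
      rcases eq_or_ne q (k+1) with rfl | hne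
      · exact absurd hq h
      · exact ⟨hq, by omega⟩
    · rintro ⟨hq, hle⟩
      exact ⟨hq, by omega⟩
  rw [this]

theorem pvA_state (n k : Nat) (hk : 1 ≤ k) (hkn : k ≤ n) :
    (PySem.List.pyRange 2 ((k : Int) + 1) 1).foldl (fun phi p =>
      if PySem.List.pyGetD phi p 0 = p then
        (PySem.List.pyRange p ((n : Int) + 1) p).foldl (fun l m =>
          PySem.List.pySetD l m
            (PySem.List.pyGetD l m 0 - PySem.Int.floordiv (PySem.List.pyGetD l m 0) p)) phi
      else phi)
      ((List.range (n + 1)).map (fun (j : Nat) => (j : Int)))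
    = (List.range (n + 1)).map (fun (j : Nat) => ((pvValA k j : Nat) : Int)) := by
  induction k with
  | zero => omega
  | succ k ih =>
    rcases Nat.lt_or_ge k 1 with h1 | h2
    · -- k = 0 : the outer range is empty, the initial list is the k = 1 state
      interval_cases k
      rw [show ((0 + 1 : Nat) : Int) + 1 = 2 by norm_num, PySem.List.pyRange_one_eq_nil (by omega),
        List.foldl_nil]
      exact List.map_congr_left (fun j hj => by rw [pvValA_one])
    · have hbound : ((k + 1 : Nat) : Int) + 1 = ((k : Int) + 1) + 1 := by push_cast; ring
      rw [hbound, PySem.List.pyRange_one_succ_right (by omega), List.foldl_append,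
        ih h2 (by omega), List.foldl_cons, List.foldl_nil]
      -- one outer step at p = (k:ℤ)+1
      have hkc : ((k : Int) + 1) = ((k + 1 : Nat) : Int) := by push_cast; ring
      have hgetp : PySem.List.pyGetD
          ((List.range (n + 1)).map (fun (j : Nat) => ((pvValA k j : Nat) : Int))) ((k : Int) + 1) 0
          = ((pvValA k (k + 1) : Nat) : Int) := by
        rw [hkc, PySem.List.pyGetD_of_nonneg _ _ (by omega), Int.toNat_natCast,
          PySem.List.getD_map_range _ _ _ _ (by omega)]
      by_cases hprime : (k + 1).Prime
      · rw [if_pos (by rw [hgetp]; exact_mod_cast (pvA_detect k h2).mpr hprime)]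
        have H := pv_foldl_setD (n + 1)
          (PySem.List.pyRange ((k : Int) + 1) ((n : Int) + 1) ((k : Int) + 1))
          (fun v => v - PySem.Int.floordiv v ((k : Int) + 1))
          (fun (j : Nat) => ((pvValA k j : Nat) : Int))
          (pv_nodup_pyRange _ _ _ (by omega))
          (fun m hm => by
            have := (PySem.List.mem_pyRange_iff_of_pos (by omega : (0:Int) < (k : Int) + 1) m).mp hm
            push_cast
            omega)
        simp only [] at H
        rw [H]
        apply List.map_congr_left
        intro j hj
        have hjn : j ≤ n := by
          have := List.mem_range.mp hj
          omega
        by_cases hmem : (j : Int) ∈ PySem.List.pyRange ((k : Int) + 1) ((n : Int) + 1) ((k : Int) + 1)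
        · obtain ⟨hdvd, hle, -⟩ := (pv_memA k n j).mp hmem
          rw [if_pos hmem, hkc, pv_floordiv_natCast]
          obtain ⟨heq, hdv⟩ := pvValA_succ_prime k j hprime hdvd (by omega)
          rw [heq]
          have hle2 : pvValA k j / (k + 1) ≤ pvValA k j := Nat.div_le_self _ _
          push_cast [Nat.cast_sub hle2]
          ring
        · rw [if_neg hmem]
          have hcond : ¬((k + 1).Prime ∧ (k + 1) ∣ j ∧ j ≠ 0) := by
            rintro ⟨-, hdvd, hj0⟩
            exact hmem ((pv_memA k n j).mpr ⟨hdvd, Nat.le_of_dvd (by omega) hdvd, hjn⟩)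
          rw [pvValA_succ_of_not k j hcond]
      · rw [if_neg (by rw [hgetp]; intro hcontra; exact hprime ((pvA_detect k h2).mp (by exact_mod_cast hcontra)))]
        exact List.map_congr_left (fun j hj => by
          rw [pvValA_succ_of_not k j (fun ⟨hp, _⟩ => hprime hp)])

theorem pvB_state (n k : Nat) (hkn : k ≤ n) :
    (PySem.List.pyRange 1 ((k : Int) + 1) 1).foldl (fun st d =>
      ((PySem.List.pyRange (2 * d) ((n : Int) + 1) d).foldl (fun l m =>
          PySem.List.pySetD l m (PySem.List.pyGetD l m 0 - PySem.List.pyGetD st.1 d 0)) st.1,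
       st.2 + PySem.List.pyGetD st.1 d 0))
      ((List.range (n + 1)).map (fun (j : Nat) => (j : Int)), 0)
    = ((List.range (n + 1)).map (fun (j : Nat) => pvValB k j),
       ((List.range k).map (fun (j : Nat) => (Nat.totient (j + 1) : Int))).sum) := by
  induction k with
  | zero =>
    rw [show ((0 : Nat) : Int) + 1 = 1 by norm_num, PySem.List.pyRange_one_eq_nil (by omega),
      List.foldl_nil]
    refine Prod.ext ?_ (by simp)
    exact (List.map_congr_left (fun j hj => (pvValB_zero j).symm))
  | succ k ih =>
    have hbound : ((k + 1 : Nat) : Int) + 1 = ((k : Int) + 1) + 1 := by push_cast; ring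
    rw [hbound, PySem.List.pyRange_one_succ_right (by omega), List.foldl_append,
      ih (by omega), List.foldl_cons, List.foldl_nil]
    have hkc : ((k : Int) + 1) = ((k + 1 : Nat) : Int) := by push_cast; ring
    have hgetd : PySem.List.pyGetD
        ((List.range (n + 1)).map (fun (j : Nat) => pvValB k j)) ((k : Int) + 1) 0
        = (Nat.totient (k + 1) : Int) := by
      rw [hkc, PySem.List.pyGetD_of_nonneg _ _ (by omega), Int.toNat_natCast,
        PySem.List.getD_map_range _ _ _ _ (by omega), pvValB_self]
    refine Prod.ext ?_ ?_
    · simp only []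
      rw [hgetd]
      have H := pv_foldl_setD (n + 1)
        (PySem.List.pyRange (2 * ((k : Int) + 1)) ((n : Int) + 1) ((k : Int) + 1))
        (fun v => v - (Nat.totient (k + 1) : Int))
        (fun (j : Nat) => pvValB k j)
        (pv_nodup_pyRange _ _ _ (by omega))
        (fun m hm => by
          have := (PySem.List.mem_pyRange_iff_of_pos (by omega : (0:Int) < (k : Int) + 1) m).mp hm
          push_cast
          omega)
      simp only [] at H
      rw [H]
      apply List.map_congr_left
      intro j hj
      have hjn : j ≤ n := by
        have := List.mem_range.mp hj
        omega
      by_cases hmem : (j : Int) ∈ PySem.List.pyRange (2 * ((k : Int) + 1)) ((n : Int) + 1) ((k : Int) + 1)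
      · obtain ⟨hdvd, hle, -⟩ := (pv_memB k n j).mp hmem
        rw [if_pos hmem, pvValB_succ_mem k j (Nat.mem_properDivisors.mpr ⟨hdvd, by omega⟩)]
      · rw [if_neg hmem]
        have hnot : (k + 1) ∉ j.properDivisors := by
          intro hpd
          obtain ⟨hdvd, hlt⟩ := Nat.mem_properDivisors.mp hpd
          obtain ⟨c, rfl⟩ := hdvd
          have hc2 : 2 ≤ c := by nlinarith
          exact hmem ((pv_memB k n _).mpr ⟨Dvd.intro c rfl, by nlinarith, hjn⟩)
        rw [pvValB_succ_not k j hnot]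
    · simp only []
      rw [hgetd, List.range_succ, List.map_append, List.sum_append]
      simp

theorem pv_range0 (n : Nat) :
    PySem.List.pyRange 0 ((n : Int) + 1) 1 = (List.range (n + 1)).map (fun (j : Nat) => (j : Int)) := by
  rw [PySem.List.pyRange_one]
  rw [show (((n : Int) + 1) - 0).toNat = n + 1 by omega]
  exact List.map_congr_left (fun a ha => by simp)

theorem pvA_eval (n : Nat) (hn : 1 ≤ n) :
    count_non_coprime_totient (n : Int)
    = PySem.Int.floordiv ((n : Int) * ((n : Int) + 1)) 2
      - ((List.range n).map (fun (j : Nat) => (Nat.totient (j + 1) : Int))).sum := by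
  simp only [count_non_coprime_totient]
  rw [pvA_bridge, pv_range0, pvA_state n n hn le_rfl]
  have hmapphi : (List.range (n + 1)).map (fun (j : Nat) => ((pvValA n j : Nat) : Int))
      = (List.range (n + 1)).map (fun (j : Nat) => (Nat.totient j : Int)) :=
    List.map_congr_left (fun j hj => by
      rw [pvValA_totient n j (Nat.lt_succ_iff.mp (List.mem_range.mp hj))])
  rw [hmapphi]
  have hslice : PySem.List.slice
      ((List.range (n + 1)).map (fun (j : Nat) => (Nat.totient j : Int))) (some 1) (some ((n : Int) + 1))
      = (List.range n).map (fun (j : Nat) => (Nat.totient (j + 1) : Int)) := by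
    rw [show ((n : Int) + 1) = ((n + 1 : Nat) : Int) by push_cast; ring,
      show (1 : Int) = ((1 : Nat) : Int) by norm_num,
      PySem.List.slice_natCast]
    rw [List.range_succ_eq_map]
    simp only [List.map_cons, List.drop_succ_cons, List.drop_zero, List.map_map]
    rw [List.take_of_length_le (by simp)]
    exact List.map_congr_left (fun a ha => by simp [Nat.succ_eq_add_one])
  rw [hslice]

theorem pvB_eval (n : Nat) :
    count_non_coprime_totient_alt (n : Int)
    = PySem.Int.floordiv ((n : Int) * ((n : Int) + 1)) 2
      - ((List.range n).map (fun (j : Nat) => (Nat.totient (j + 1) : Int))).sum := by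
  simp only [count_non_coprime_totient_alt]
  rw [show (((PySem.List.pyRange 1 ((n : Int) + 1) 1).foldl (fun st d =>
      ((PySem.List.pyRange (2 * d) ((n : Int) + 1) d).foldl (fun l m =>
          l.setIfInBounds m.toNat (l.getD m.toNat 0 - st.1.getD d.toNat 0)) st.1,
       st.2 + st.1.getD d.toNat 0)) ((PySem.List.pyRange 0 ((n : Int) + 1) 1).toArray, (0 : Int))).2)
    = ((PySem.List.pyRange 1 ((n : Int) + 1) 1).foldl (fun st d =>
        ((PySem.List.pyRange (2 * d) ((n : Int) + 1) d).foldl (fun l m =>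
            PySem.List.pySetD l m (PySem.List.pyGetD l m 0 - PySem.List.pyGetD st.1 d 0)) st.1,
         st.2 + PySem.List.pyGetD st.1 d 0)) (PySem.List.pyRange 0 ((n : Int) + 1) 1, (0 : Int))).2
    from congrArg Prod.snd (pvB_bridge ((n : Int)))]
  rw [pv_range0, pvB_state n n le_rfl]

theorem pvA_neg (N : Int) (h : N < 0) :
    count_non_coprime_totient N = PySem.Int.floordiv (N * (N + 1)) 2 := by
  simp only [count_non_coprime_totient]
  rw [PySem.List.pyRange_one_eq_nil (show N + 1 ≤ 2 by omega), List.foldl_nil,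
    PySem.List.pyRange_one_eq_nil (show N + 1 ≤ 0 by omega)]
  simp [pv_slice_nil]

theorem pvB_neg (N : Int) (h : N < 0) :
    count_non_coprime_totient_alt N = PySem.Int.floordiv (N * (N + 1)) 2 := by
  simp only [count_non_coprime_totient_alt]
  rw [PySem.List.pyRange_one_eq_nil (show N + 1 ≤ 1 by omega), List.foldl_nil]
  simp

theorem pv_final (N : Int) : count_non_coprime_totient N = count_non_coprime_totient_alt N := by
  rcases lt_trichotomy N 0 with h | h | h
  · rw [pvA_neg N h, pvB_neg N h]
  · subst h; decide
  · obtain ⟨n, rfl⟩ : ∃ n : Nat, N = (n : Int) := ⟨N.toNat, by omega⟩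
    rw [pvA_eval n (by omega), pvB_eval n]


-- ===== VERDICT (by name: the statement is the Claim_ definition above) =====
theorem count_non_coprime_totient_spec : Claim_equal_count_non_coprime_totient := by
  intro N _
  unfold Spec_count_non_coprime_totient
  exact pv_final N
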